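-- pv_equiv track=rewrite | github.com/yannickrlk/Beatflow | core/fingerprint.py | _create_hashes
-- ===== SOURCE A (Python) =====
-- from typing import List, Dict, Tuple, Optional
--
-- FAN_OUT = 15  # Number of target peaks per anchor
--
-- TARGET_TIME_DELTA = 200  # Max time frames between anchor and target
--
-- def _create_hashes(peaks: List[Tuple[int, int]]) -> List[Tuple[int, int]]:
--     """Create hashes from peak pairs.
--
--     Uses anchor-target pairing with fan-out for robustness.
--
--     Args:
--         peaks: List of (frequency_bin, time_frame) tuples
--
--     Returns:
--         List of (hash_value, time_offset) tuples
--     """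
--     # Sort peaks by time
--     peaks = sorted(peaks, key=lambda p: p[1])
--
--     hashes = []
--
--     for i, (freq1, time1) in enumerate(peaks):
--         # Find target peaks within the fan-out window
--         targets_found = 0
--
--         for j in range(i + 1, len(peaks)):
--             freq2, time2 = peaks[j]
--             time_delta = time2 - time1
--
--             # Check time window
--             if time_delta > TARGET_TIME_DELTA:
--                 break
--
--             if time_delta <= 0:
--                 continue
--
--             # Create hash from (freq1, freq2, time_delta)
--             # Pack into a single integer for efficient storage
--             hash_value = (freq1 << 20) | (freq2 << 10) | time_delta
--
--             hashes.append((hash_value, time1))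
--
--             targets_found += 1
--             if targets_found >= FAN_OUT:
--                 break
--
--     return hashes
-- ===== SOURCE B (Python) =====
-- from typing import List, Tuple
--
-- FAN_OUT = 15
-- TARGET_TIME_DELTA = 200
--
--
-- def _create_hashes(peaks: List[Tuple[int, int]]) -> List[Tuple[int, int]]:
--     """Create hashes from peak pairs (anchor-target with fan-out).
--
--     Groups the time-sorted peaks into runs of equal time; every anchor in a
--     run shares the same target list, so the (freq2, time_delta) targets are
--     computed ONCE per run instead of once per peak, and equal-time peaks are
--     never re-scanned.
--     """
--     ps = sorted(peaks, key=lambda p: p[1])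
--
--     # runs of consecutive equal-time peaks: list of (time, [freqs])
--     groups = []
--     i = 0
--     n = len(ps)
--     while i < n:
--         t = ps[i][1]
--         fs = []
--         while i < n and ps[i][1] == t:
--             fs.append(ps[i][0])
--             i += 1
--         groups.append((t, fs))
--
--     hashes = []
--     for g, (t1, freqs) in enumerate(groups):
--         # shared targets for every anchor of this run
--         targets = []
--         room = FAN_OUT
--         for t2, fs2 in groups[g + 1:]:
--             dt = t2 - t1
--             if dt > TARGET_TIME_DELTA:
--                 break
--             taken = fs2[:room]
--             targets.extend((f2, dt) for f2 in taken)
--             if room <= len(fs2):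
--                 break
--             room -= len(fs2)
--         for f1 in freqs:
--             for f2, dt in targets:
--                 hashes.append(((f1 << 20) | (f2 << 10) | dt, t1))
--     return hashes
-- ===== Notes on version B (the rewrite author's own statement) =====
-- stated objective: alternative
-- what changed: B groups the time-sorted peaks into runs of equal time and computes the (freq2, time_delta) target list once per run (shared by every anchor of the run) by walking later groups with a remaining-capacity counter, instead of A's per-peak forward scan that re-skips every equal-time peak and counts targets per anchor.
import Mathlib
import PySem

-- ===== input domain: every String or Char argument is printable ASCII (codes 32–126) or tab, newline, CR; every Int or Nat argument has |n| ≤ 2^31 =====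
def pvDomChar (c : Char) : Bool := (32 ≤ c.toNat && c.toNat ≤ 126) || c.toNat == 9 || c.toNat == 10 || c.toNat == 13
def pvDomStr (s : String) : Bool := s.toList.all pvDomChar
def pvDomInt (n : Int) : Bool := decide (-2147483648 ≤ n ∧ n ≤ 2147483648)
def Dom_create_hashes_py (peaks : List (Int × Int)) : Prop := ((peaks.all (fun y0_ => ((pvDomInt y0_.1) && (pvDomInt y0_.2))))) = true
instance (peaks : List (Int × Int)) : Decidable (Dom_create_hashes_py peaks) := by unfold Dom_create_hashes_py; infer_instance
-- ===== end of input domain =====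

-- B groups the time-sorted peaks into runs of equal time and builds each run's
-- target list once, shared by every anchor of the run; A scans forward from each
-- peak, skipping equal-time peaks one by one. Same return value, different algorithm.

-- ===== PORT A =====
-- inner loop of A: 'for j in range(i+1, len(peaks))' over the suffix, carrying targets_found
def pvInnerA (f1 t1 : Int) : List (Int × Int) → Nat → List (Int × Int)
  | [], _ => []
  | (f2, t2) :: rest, cnt =>
    let dt := t2 - t1
    if 200 < dt then []
    else if dt ≤ 0 then pvInnerA f1 t1 rest cnt
    else
      let h := (PySem.Int.bor (PySem.Int.bor (f1 <<< 20) (f2 <<< 10)) dt, t1)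
      if 15 ≤ cnt + 1 then [h] else h :: pvInnerA f1 t1 rest (cnt + 1)

def create_hashes_py (peaks : List (Int × Int)) : List (Int × Int) :=
  let ps := PySem.List.sorted peaks (fun p => p.2) false
  (PySem.List.enumerate ps 0).foldl
    (fun acc ip => acc ++ pvInnerA ip.2.1 ip.2.2 (ps.drop (ip.1.toNat + 1)) 0) []

-- ===== PORT B =====
-- the grouping while-loop of Source B: runs of consecutive equal-time peaks
def pvGroupsB : List (Int × Int) → List (Int × List Int)
  | [] => []
  | (f, t) :: rest =>
    (t, f :: (rest.takeWhile (fun p => p.2 == t)).map (fun p => p.1))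
      :: pvGroupsB (rest.dropWhile (fun p => p.2 == t))
termination_by l => l.length
decreasing_by
  have := List.length_dropWhile_le (fun p : Int × Int => p.2 == t) rest
  simp
  omega

-- the per-run target loop of Source B, carrying the remaining capacity 'room'
def pvTargetsB (t1 : Int) : List (Int × List Int) → Nat → List (Int × Int)
  | [], _ => []
  | (t2, fs) :: gs, room =>
    let dt := t2 - t1
    if 200 < dt then []
    else
      let tk := (fs.take room).map (fun f => (f, dt))
      if room ≤ fs.length then tk
      else tk ++ pvTargetsB t1 gs (room - fs.length)

def pvRender (f1 t1 : Int) (ft : Int × Int) : Int × Int :=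
  (PySem.Int.bor (PySem.Int.bor (f1 <<< 20) (ft.1 <<< 10)) ft.2, t1)

-- the emission loop of Source B: each anchor of a run renders the shared target list
def pvEmitGroups : List (Int × List Int) → List (Int × Int)
  | [] => []
  | (t1, fs) :: gs =>
    fs.flatMap (fun f1 => (pvTargetsB t1 gs 15).map (pvRender f1 t1)) ++ pvEmitGroups gs

def create_hashes_py_alt (peaks : List (Int × Int)) : List (Int × Int) :=
  pvEmitGroups (pvGroupsB (PySem.List.sorted peaks (fun p => p.2) false))

-- ===== PRECONDITION & SPEC =====
def Spec_create_hashes_py (peaks : List (Int × Int)) (out : List (Int × Int)) : Prop := out = create_hashes_py_alt peaks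
instance (peaks : List (Int × Int)) (out : List (Int × Int)) : Decidable (Spec_create_hashes_py peaks out) := by unfold Spec_create_hashes_py; infer_instance

-- ===== CLAIM (what is proved, stated in full; the proofs are below) =====
def Claim_equal_create_hashes_py : Prop := ∀ (peaks : List (Int × Int)), Dom_create_hashes_py peaks → Spec_create_hashes_py peaks (create_hashes_py peaks)

-- ===== LEMMAS AND PROOFS =====

-- A as a suffix recursion: each anchor scans the peaks after it
def pvAemit : List (Int × Int) → List (Int × Int)
  | [] => []
  | (f1, t1) :: rest => pvInnerA f1 t1 rest 0 ++ pvAemit rest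

-- common intermediate: the (freq2, dt) pairs selected after the anchor, capacity 'room'
def pvPairs (t1 : Int) : List (Int × Int) → Nat → List (Int × Int)
  | [], _ => []
  | (f2, t2) :: rest, room =>
    let dt := t2 - t1
    if 200 < dt then []
    else if dt ≤ 0 then pvPairs t1 rest room
    else if room ≤ 1 then [(f2, dt)]
    else (f2, dt) :: pvPairs t1 rest (room - 1)

lemma pvA_fold_eq_aemit : ∀ (rest full : List (Int × Int)) (s : Nat), full.drop s = rest →
    (PySem.List.enumerate rest (s : Int)).flatMap
      (fun ip => pvInnerA ip.2.1 ip.2.2 (full.drop (ip.1.toNat + 1)) 0) = pvAemit rest := by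
  intro rest
  induction rest with
  | nil => intro full s _; simp [PySem.List.enumerate_nil, pvAemit]
  | cons hd tl ih =>
    intro full s hdrop
    obtain ⟨f, t⟩ := hd
    rw [PySem.List.enumerate_cons]
    have hstn : ((s : Int)).toNat = s := by simp
    have hd1 : full.drop (s + 1) = tl := by
      have h2 := congrArg (List.drop 1) hdrop
      rw [List.drop_drop] at h2
      simpa using h2
    have hcast : ((s : Int) + 1) = ((s + 1 : Nat) : Int) := by push_cast; ring
    simp only [List.flatMap_cons, hstn, hd1, pvAemit, hcast]
    rw [ih full (s + 1) hd1]

lemma pvInnerA_skip_prefix (f1 t1 : Int) :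
    ∀ (xs l : List (Int × Int)) (cnt : Nat), (∀ p ∈ xs, p.2 ≤ t1) →
      pvInnerA f1 t1 (xs ++ l) cnt = pvInnerA f1 t1 l cnt := by
  intro xs
  induction xs with
  | nil => intro l cnt _; simp
  | cons hd tl ih =>
    intro l cnt hle
    obtain ⟨f2, t2⟩ := hd
    have h2 : t2 ≤ t1 := hle (f2, t2) (by simp)
    simp only [List.cons_append, pvInnerA]
    have h1 : ¬ (200 < t2 - t1) := by omega
    have h0 : t2 - t1 ≤ 0 := by omega
    rw [if_neg h1, if_pos h0]
    exact ih l cnt (fun p hp => hle p (List.mem_cons_of_mem _ hp))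

lemma pvInnerA_eq_pairs (f1 t1 : Int) :
    ∀ (l : List (Int × Int)) (cnt : Nat), cnt < 15 →
      pvInnerA f1 t1 l cnt = (pvPairs t1 l (15 - cnt)).map (pvRender f1 t1) := by
  intro l
  induction l with
  | nil => intro cnt _; simp [pvInnerA, pvPairs]
  | cons hd tl ih =>
    intro cnt hcnt
    obtain ⟨f2, t2⟩ := hd
    simp only [pvInnerA, pvPairs]
    by_cases h1 : 200 < t2 - t1
    · simp [h1]
    · by_cases h0 : t2 - t1 ≤ 0
      · simp only [if_neg h1, if_pos h0]
        exact ih cnt hcnt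
      · simp only [if_neg h1, if_neg h0]
        by_cases hlast : 15 ≤ cnt + 1
        · have hr : 15 - cnt ≤ 1 := by omega
          rw [if_pos hlast, if_pos hr]
          simp [pvRender]
        · have hr : ¬ (15 - cnt ≤ 1) := by omega
          have heq : 15 - cnt - 1 = 15 - (cnt + 1) := by omega
          rw [if_neg hlast, if_neg hr]
          simp only [List.map_cons, heq]
          rw [ih (cnt + 1) (by omega)]
          rfl

lemma pvPairs_run (t1 t : Int) (hpos : 0 < t - t1) (hle : t - t1 ≤ 200) :
    ∀ (xs l : List (Int × Int)) (room : Nat), 1 ≤ room → (∀ p ∈ xs, p.2 = t) →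
      pvPairs t1 (xs ++ l) room =
        if room ≤ xs.length then (xs.take room).map (fun p => (p.1, t - t1))
        else xs.map (fun p => (p.1, t - t1)) ++ pvPairs t1 l (room - xs.length) := by
  intro xs
  induction xs with
  | nil =>
    intro l room hroom _
    have h : ¬ (room ≤ ([] : List (Int × Int)).length) := by simp; omega
    rw [List.nil_append, if_neg h]
    simp
  | cons hd tl ih =>
    intro l room hroom hall
    obtain ⟨f2, t2⟩ := hd
    have ht2 : t2 = t := hall (f2, t2) (by simp)
    subst ht2
    simp only [List.cons_append, pvPairs]
    have h1 : ¬ (200 < t2 - t1) := by omega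
    have h0 : ¬ (t2 - t1 ≤ 0) := by omega
    rw [if_neg h1, if_neg h0]
    by_cases hlast : room ≤ 1
    · have hr1 : room = 1 := by omega
      subst hr1
      have h : (1 : Nat) ≤ ((f2, t2) :: tl).length := by simp
      rw [if_pos hlast, if_pos h]
      simp
    · rw [if_neg hlast]
      rw [ih l (room - 1) (by omega) (fun p hp => hall p (List.mem_cons_of_mem _ hp))]
      by_cases hc : room - 1 ≤ tl.length
      · have hc' : room ≤ ((f2, t2) :: tl).length := by simp; omega
        rw [if_pos hc, if_pos hc']
        have h : room = (room - 1) + 1 := by omega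
        rw [h]
        simp
      · have hc' : ¬ (room ≤ ((f2, t2) :: tl).length) := by simp; omega
        rw [if_neg hc, if_neg hc']
        have h : room - 1 - tl.length = room - ((f2, t2) :: tl).length := by simp; omega
        simp only [List.map_cons, List.cons_append, h]

lemma pvTargetsB_eq_pairs (t1 : Int) :
    ∀ (l : List (Int × Int)), (∀ p ∈ l, t1 < p.2) →
      ∀ (room : Nat), 1 ≤ room → pvTargetsB t1 (pvGroupsB l) room = pvPairs t1 l room := by
  intro l
  induction l using pvGroupsB.induct with
  | case1 => intro _ room _; simp [pvGroupsB, pvTargetsB, pvPairs]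
  | case2 f t rest ih =>
    intro hpos room hroom
    have ht : t1 < t := hpos (f, t) (by simp)
    have hsplit : rest.takeWhile (fun p => p.2 == t) ++ rest.dropWhile (fun p => p.2 == t) = rest :=
      List.takeWhile_append_dropWhile
    have hrun : ∀ p ∈ rest.takeWhile (fun p => p.2 == t), p.2 = t := by
      intro p hp
      have h := List.mem_takeWhile_imp hp
      simpa using h
    set run := rest.takeWhile (fun p => p.2 == t) with hrundef
    set rest' := rest.dropWhile (fun p => p.2 == t) with hrestdef
    rw [pvGroupsB]
    simp only [pvTargetsB]
    by_cases h1 : 200 < t - t1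
    · rw [if_pos h1]
      simp [pvPairs, h1]
    · rw [if_neg h1]
      have hallxs : ∀ p ∈ (f, t) :: run, p.2 = t := by
        intro p hp
        rcases List.mem_cons.mp hp with h | h
        · rw [h]
        · exact hrun p h
      have hconsapp : (f, t) :: rest = ((f, t) :: run) ++ rest' := by
        rw [List.cons_append, hsplit]
      conv_rhs => rw [hconsapp]
      rw [pvPairs_run t1 t (by omega) (by omega) ((f, t) :: run) rest' room hroom hallxs]
      have hflen : (f :: run.map (fun p => p.1)).length = ((f, t) :: run).length := by simp
      by_cases hc : room ≤ ((f, t) :: run).length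
      · rw [if_pos (by rw [hflen]; exact hc), if_pos hc]
        rw [List.map_take, List.map_take]
        congr 1
        simp only [List.map_cons, List.map_map]
        rfl
      · rw [if_neg (by rw [hflen]; exact hc), if_neg hc]
        have htake : (f :: run.map (fun p => p.1)).take room = f :: run.map (fun p => p.1) := by
          apply List.take_of_length_le
          rw [hflen]; omega
        rw [htake]
        have hmap : (f :: run.map (fun p => p.1)).map (fun x => (x, t - t1))
            = ((f, t) :: run).map (fun p => (p.1, t - t1)) := by
          simp [List.map_map]
        rw [hmap, hflen]
        congr 1
        apply ih
        · intro p hp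
          exact hpos p (List.mem_cons_of_mem _ ((List.dropWhile_sublist _).subset hp))
        · simp at hc ⊢
          omega

lemma pvAemit_run (t : Int) :
    ∀ (xs l : List (Int × Int)), (∀ p ∈ xs, p.2 = t) →
      pvAemit (xs ++ l) =
        xs.flatMap (fun p => (pvPairs t l 15).map (pvRender p.1 t)) ++ pvAemit l := by
  intro xs
  induction xs with
  | nil => intro l _; simp
  | cons hd tl ih =>
    intro l hall
    obtain ⟨f2, t2⟩ := hd
    have ht2 : t2 = t := hall (f2, t2) (by simp)
    subst ht2
    simp only [List.cons_append, pvAemit, List.flatMap_cons]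
    have htl : ∀ p ∈ tl, p.2 = t2 := fun p hp => hall p (List.mem_cons_of_mem _ hp)
    rw [pvInnerA_skip_prefix f2 t2 tl l 0 (fun p hp => le_of_eq (htl p hp))]
    rw [pvInnerA_eq_pairs f2 t2 l 0 (by omega)]
    rw [ih l htl, List.append_assoc]

lemma pvDropWhile_gt (t : Int) :
    ∀ (l : List (Int × Int)), l.Pairwise (fun a b => a.2 ≤ b.2) → (∀ p ∈ l, t ≤ p.2) →
      ∀ p ∈ l.dropWhile (fun p => p.2 == t), t < p.2 := by
  intro l
  induction l with
  | nil => intro _ _ p hp; simp [List.dropWhile] at hp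
  | cons q tl ih =>
    intro hpw hge
    rw [List.dropWhile_cons]
    by_cases hq : q.2 = t
    · simp only [hq, beq_self_eq_true, if_true]
      exact ih (List.pairwise_cons.mp hpw).2 (fun p hp => hge p (List.mem_cons_of_mem _ hp))
    · have hb : (q.2 == t) = false := beq_false_of_ne hq
      simp only [hb, Bool.false_eq_true, if_false]
      intro p hp
      have hqt : t < q.2 := lt_of_le_of_ne (hge q (by simp)) (fun h => hq h.symm)
      rcases List.mem_cons.mp hp with h | h
      · rw [h]; exact hqt
      · exact lt_of_lt_of_le hqt ((List.pairwise_cons.mp hpw).1 p h)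

lemma pvAemit_eq_emitGroups :
    ∀ (l : List (Int × Int)), l.Pairwise (fun a b => a.2 ≤ b.2) →
      pvAemit l = pvEmitGroups (pvGroupsB l) := by
  intro l
  induction l using pvGroupsB.induct with
  | case1 => intro _; simp [pvAemit, pvGroupsB, pvEmitGroups]
  | case2 f t rest ih =>
    intro hpw
    have hpw' : rest.Pairwise (fun a b => a.2 ≤ b.2) := (List.pairwise_cons.mp hpw).2
    have hge : ∀ p ∈ rest, t ≤ p.2 := (List.pairwise_cons.mp hpw).1
    have hsplit : rest.takeWhile (fun p => p.2 == t) ++ rest.dropWhile (fun p => p.2 == t) = rest :=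
      List.takeWhile_append_dropWhile
    set run := rest.takeWhile (fun p => p.2 == t) with hrundef
    set rest' := rest.dropWhile (fun p => p.2 == t) with hrestdef
    have hrun : ∀ p ∈ run, p.2 = t := by
      intro p hp
      have h := List.mem_takeWhile_imp hp
      simpa using h
    have hposrest' : ∀ p ∈ rest', t < p.2 := pvDropWhile_gt t rest hpw' hge
    have hrest'pw : rest'.Pairwise (fun a b => a.2 ≤ b.2) :=
      hpw'.sublist (List.dropWhile_sublist _)
    have hconsapp : (f, t) :: rest = ((f, t) :: run) ++ rest' := by
      rw [List.cons_append, hsplit]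
    have hallxs : ∀ p ∈ (f, t) :: run, p.2 = t := by
      intro p hp
      rcases List.mem_cons.mp hp with h | h
      · rw [h]
      · exact hrun p h
    conv_lhs => rw [hconsapp]
    rw [pvAemit_run t ((f, t) :: run) rest' hallxs]
    rw [pvGroupsB]
    simp only [pvEmitGroups]
    rw [pvTargetsB_eq_pairs t rest' hposrest' 15 (by omega)]
    rw [ih hrest'pw]
    congr 1
    have hm : (f :: run.map (fun p => p.1)) = ((f, t) :: run).map (fun p => p.1) := by simp
    rw [hm, List.flatMap_map]

-- ===== VERDICT (by name: the statement is the Claim_ definition above) =====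
theorem create_hashes_py_spec : Claim_equal_create_hashes_py := by
  unfold Claim_equal_create_hashes_py Spec_create_hashes_py
  intro peaks _
  unfold create_hashes_py create_hashes_py_alt
  simp only []
  set ps := PySem.List.sorted peaks (fun p => p.2) false with hps
  rw [PySem.List.foldl_append_eq_flatMap]
  rw [List.nil_append]
  have h0 : ((0 : Nat) : Int) = (0 : Int) := by norm_num
  rw [← h0, pvA_fold_eq_aemit ps ps 0 (by simp)]
  apply pvAemit_eq_emitGroups
  have h := PySem.List.sorted_map_key_pairwise peaks (fun p => p.2)
  exact (List.pairwise_map).mp h
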